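-- pv_equiv track=rewrite | github.com/FadelMamar/video-qa | src/watcher/analyzer/base.py | _calculate_bounding_region
-- ===== SOURCE A (Python) =====
-- from typing import List, Literal, Optional, Union, Dict, Any
--
-- def _calculate_bounding_region(bboxes: List[tuple]) -> tuple:
--     """Calculate overall bounding region from sequence of bounding boxes."""
--     if not bboxes:
--         return (0, 0, 0, 0)
--
--     x1_min = min(bbox[0] for bbox in bboxes)
--     y1_min = min(bbox[1] for bbox in bboxes)
--     x2_max = max(bbox[2] for bbox in bboxes)
--     y2_max = max(bbox[3] for bbox in bboxes)
--
--     return (x1_min, y1_min, x2_max, y2_max)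
-- ===== SOURCE B (Python) =====
-- from typing import List
--
-- def _calculate_bounding_region(bboxes: List[tuple]) -> tuple:
--     """Single pass: seed the four extrema from the first box, update as we go."""
--     if not bboxes:
--         return (0, 0, 0, 0)
--     x1, y1, x2, y2 = bboxes[0][0], bboxes[0][1], bboxes[0][2], bboxes[0][3]
--     for bbox in bboxes[1:]:
--         if bbox[0] < x1:
--             x1 = bbox[0]
--         if bbox[1] < y1:
--             y1 = bbox[1]
--         if bbox[2] > x2:
--             x2 = bbox[2]
--         if bbox[3] > y2:
--             y2 = bbox[3]
--     return (x1, y1, x2, y2)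
-- ===== Notes on version B (the rewrite author's own statement) =====
-- stated objective: alternative
-- what changed: Replaces A's four separate min/max generator scans with one loop that seeds the four extrema from the first box and updates all four with comparisons in a single pass.
import Mathlib
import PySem

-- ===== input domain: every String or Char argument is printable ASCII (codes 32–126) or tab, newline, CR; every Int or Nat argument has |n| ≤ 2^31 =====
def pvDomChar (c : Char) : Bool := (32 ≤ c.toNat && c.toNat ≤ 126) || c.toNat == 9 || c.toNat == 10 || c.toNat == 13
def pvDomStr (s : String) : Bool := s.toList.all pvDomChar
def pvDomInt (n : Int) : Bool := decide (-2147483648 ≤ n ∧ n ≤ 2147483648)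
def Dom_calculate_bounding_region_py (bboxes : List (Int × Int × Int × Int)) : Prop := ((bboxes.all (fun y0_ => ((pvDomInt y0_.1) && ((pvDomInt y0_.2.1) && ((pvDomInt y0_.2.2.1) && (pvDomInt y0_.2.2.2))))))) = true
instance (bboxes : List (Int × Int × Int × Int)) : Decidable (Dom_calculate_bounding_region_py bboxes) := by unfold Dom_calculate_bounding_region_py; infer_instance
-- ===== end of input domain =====

-- B replaces A's four separate min/max scans by one pass keeping four running extrema (objective: alternative decomposition).

-- ===== PORT A =====
-- Python's min/max over a nonempty sequence: fold from the first element.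
def pvMinList (a : Int) (l : List Int) : Int := l.foldl min a
def pvMaxList (a : Int) (l : List Int) : Int := l.foldl max a

def calculate_bounding_region_py (bboxes : List (Int × Int × Int × Int)) : Int × Int × Int × Int :=
  match bboxes with
  | [] => (0, 0, 0, 0)
  | b :: rest =>
    let x1_min := pvMinList b.1 (rest.map (fun bb => bb.1))
    let y1_min := pvMinList b.2.1 (rest.map (fun bb => bb.2.1))
    let x2_max := pvMaxList b.2.2.1 (rest.map (fun bb => bb.2.2.1))
    let y2_max := pvMaxList b.2.2.2 (rest.map (fun bb => bb.2.2.2))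
    (x1_min, y1_min, x2_max, y2_max)

-- ===== PORT B =====
def calculate_bounding_region_py_alt (bboxes : List (Int × Int × Int × Int)) : Int × Int × Int × Int :=
  match bboxes with
  | [] => (0, 0, 0, 0)
  | b :: rest =>
    rest.foldl (fun st bb =>
      let x1 := if bb.1 < st.1 then bb.1 else st.1
      let y1 := if bb.2.1 < st.2.1 then bb.2.1 else st.2.1
      let x2 := if bb.2.2.1 > st.2.2.1 then bb.2.2.1 else st.2.2.1
      let y2 := if bb.2.2.2 > st.2.2.2 then bb.2.2.2 else st.2.2.2
      (x1, y1, x2, y2)) (b.1, b.2.1, b.2.2.1, b.2.2.2)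

-- ===== PRECONDITION & SPEC =====
def Spec_calculate_bounding_region_py (bboxes : List (Int × Int × Int × Int)) (out : Int × Int × Int × Int) : Prop := out = calculate_bounding_region_py_alt bboxes
instance (bboxes : List (Int × Int × Int × Int)) (out : Int × Int × Int × Int) : Decidable (Spec_calculate_bounding_region_py bboxes out) := by unfold Spec_calculate_bounding_region_py; infer_instance

-- ===== CLAIM (what is proved, stated in full; the proofs are below) =====
def Claim_equal_calculate_bounding_region_py : Prop := ∀ (bboxes : List (Int × Int × Int × Int)), Dom_calculate_bounding_region_py bboxes → Spec_calculate_bounding_region_py bboxes (calculate_bounding_region_py bboxes)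

-- ===== LEMMAS AND PROOFS =====

theorem pv_ite_min (a b : Int) : (if b < a then b else a) = min a b := by
  split_ifs <;> omega

theorem pv_ite_max (a b : Int) : (if b > a then b else a) = max a b := by
  split_ifs <;> omega

-- The combined fold computes the four separate folds componentwise.
theorem pv_fold_split (rest : List (Int × Int × Int × Int)) :
    ∀ (st : Int × Int × Int × Int),
    rest.foldl (fun st bb =>
      let x1 := if bb.1 < st.1 then bb.1 else st.1
      let y1 := if bb.2.1 < st.2.1 then bb.2.1 else st.2.1
      let x2 := if bb.2.2.1 > st.2.2.1 then bb.2.2.1 else st.2.2.1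
      let y2 := if bb.2.2.2 > st.2.2.2 then bb.2.2.2 else st.2.2.2
      (x1, y1, x2, y2)) st
    = (pvMinList st.1 (rest.map (fun bb => bb.1)),
       pvMinList st.2.1 (rest.map (fun bb => bb.2.1)),
       pvMaxList st.2.2.1 (rest.map (fun bb => bb.2.2.1)),
       pvMaxList st.2.2.2 (rest.map (fun bb => bb.2.2.2))) := by
  induction rest with
  | nil => intro st; simp [pvMinList, pvMaxList]
  | cons hd tl ih =>
    intro st
    simp only [List.foldl_cons, List.map_cons, pvMinList, pvMaxList] at *
    rw [ih]
    simp only [pv_ite_min, pv_ite_max]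

-- ===== VERDICT (by name: the statement is the Claim_ definition above) =====
theorem calculate_bounding_region_py_spec : Claim_equal_calculate_bounding_region_py := by
  intro bboxes _
  unfold Spec_calculate_bounding_region_py calculate_bounding_region_py calculate_bounding_region_py_alt
  cases bboxes with
  | nil => rfl
  | cons b rest => exact (pv_fold_split rest (b.1, b.2.1, b.2.2.1, b.2.2.2)).symm
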